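-- pv_equiv track=rewrite | github.com/skalaydzhiyski/competitive-programming | cf/contest/1777/b/b.py | solve
-- ===== SOURCE A (Python) =====
-- import math
--
-- def solve(n):
--     k = 10**9 + 7
--     p = []
--     current = 1
--     while current <= n:
--         p.append(current)
--         current += 1
--     b = sum(p[:-1])*2
--     res = (math.factorial(n) * b) % k
--     return res
--     number = int(number)
-- ===== SOURCE B (Python) =====
-- def solve(n):
--     k = 10**9 + 7
--     f = 1
--     for i in range(2, n + 1):
--         f = f * i % k
--     return f * (n * (n - 1) % k) % k
-- ===== Notes on version B (the rewrite author's own statement) =====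
-- stated objective: faster
-- what changed: B drops A's materialised list 1..n and full-precision math.factorial: it computes the factorial iteratively modulo 1e9+7 (bounded-size multiplications) and replaces sum(p[:-1])*2 by the closed form n*(n-1).
import Mathlib
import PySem

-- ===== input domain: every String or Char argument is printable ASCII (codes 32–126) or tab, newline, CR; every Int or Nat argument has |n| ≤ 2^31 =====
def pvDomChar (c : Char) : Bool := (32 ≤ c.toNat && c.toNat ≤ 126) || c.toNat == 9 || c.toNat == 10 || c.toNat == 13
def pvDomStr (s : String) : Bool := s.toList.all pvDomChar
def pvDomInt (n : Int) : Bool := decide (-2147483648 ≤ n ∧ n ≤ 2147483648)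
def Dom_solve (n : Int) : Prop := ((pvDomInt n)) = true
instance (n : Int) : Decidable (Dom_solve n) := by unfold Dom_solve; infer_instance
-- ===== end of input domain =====

-- B replaces A's materialised list 1..n and full-precision factorial by a modular
-- factorial loop and the closed form n*(n-1): faster (bounded-size multiplications).

-- ===== PORT A =====
-- the while loop: append `current` while current <= n
def solveLoop (n current : Int) (p : List Int) : List Int :=
  if current ≤ n then solveLoop n (current + 1) (p ++ [current]) else p
termination_by (n + 1 - current).toNat
decreasing_by omega

def solve (n : Int) : Int :=
  let k : Int := 10 ^ 9 + 7
  let p := solveLoop n 1 []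
  let b := (PySem.List.slice p none (some (-1))).sum * 2
  PySem.Int.mod (((n.toNat.factorial : Nat) : Int) * b) k  -- math.factorial(n), n ≥ 0 by Pre_

-- ===== PORT B =====
def solve_alt (n : Int) : Int :=
  let k : Int := 10 ^ 9 + 7
  let f := (PySem.List.pyRange 2 (n + 1) 1).foldl (fun f i => PySem.Int.mod (f * i) k) 1
  PySem.Int.mod (f * PySem.Int.mod (n * (n - 1)) k) k

-- ===== PRECONDITION & SPEC =====
-- Pre_ excludes n < 0, where math.factorial in A raises ValueError.
def Pre_solve (n : Int) : Prop := 0 ≤ n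
instance (n : Int) : Decidable (Pre_solve n) := by unfold Pre_solve; infer_instance
def pvWitness_solve : Int := 5

def Spec_solve (n : Int) (out : Int) : Prop := out = solve_alt n
instance (n : Int) (out : Int) : Decidable (Spec_solve n out) := by unfold Spec_solve; infer_instance

-- ===== CLAIM (what is proved, stated in full; the proofs are below) =====
def Claim_equal_solve : Prop := ∀ (n : Int), Dom_solve n → Pre_solve n → Spec_solve n (solve n)

-- ===== LEMMAS AND PROOFS =====

-- the while loop builds p ++ [c, c+1, …, n]
theorem solveLoop_eq (fuel : Nat) : ∀ (n c : Int) (p : List Int), (n + 1 - c).toNat = fuel →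
    solveLoop n c p = p ++ PySem.List.pyRange c (n + 1) 1 := by
  induction fuel with
  | zero =>
    intro n c p h
    rw [solveLoop]
    rw [if_neg (by omega), PySem.List.pyRange_one_eq_nil (by omega), List.append_nil]
  | succ f ih =>
    intro n c p h
    rw [solveLoop]
    by_cases hc : c ≤ n
    · rw [if_pos hc, ih n (c + 1) (p ++ [c]) (by omega),
        PySem.List.pyRange_one_cons (show c < n + 1 by omega)]
      simp
    · rw [if_neg hc, PySem.List.pyRange_one_eq_nil (by omega), List.append_nil]

theorem sum_range_map (m : Nat) :
    ((List.range m).map (fun k : Nat => (1 : Int) + (k : Int))).sum * 2 = (m : Int) * ((m : Int) + 1) := by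
  induction m with
  | zero => simp
  | succ j ih =>
    rw [List.range_succ, List.map_append, List.sum_append]
    simp only [List.map_cons, List.map_nil, List.sum_cons, List.sum_nil]
    push_cast
    push_cast at ih
    nlinarith [ih]

theorem dropLast_range (m : Nat) : (List.range m).dropLast = List.range (m - 1) := by
  cases m with
  | zero => simp
  | succ j => rw [List.range_succ, List.dropLast_concat]; rfl

-- 2 * (1 + 2 + ⋯ + (m-1)) = m (m-1)
theorem sum_dropLast (m : Nat) :
    (PySem.List.slice (PySem.List.pyRange 1 ((m : Int) + 1) 1) none (some (-1))).sum * 2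
      = (m : Int) * ((m : Int) - 1) := by
  rw [PySem.List.slice_to_neg_one, PySem.List.pyRange_one]
  have h1 : ((m : Int) + 1 - 1).toNat = m := by omega
  rw [h1, ← List.map_dropLast, dropLast_range m]
  cases m with
  | zero => simp
  | succ j =>
    have h2 : j + 1 - 1 = j := rfl
    rw [h2, sum_range_map j]
    push_cast
    ring

theorem mod_mul_mod (a b K : Int) : a % K * b % K = a * b % K := by
  rw [Int.mul_emod, Int.emod_emod_of_dvd _ dvd_rfl, ← Int.mul_emod]

theorem factmod (m : Nat) :
    (PySem.List.pyRange 2 ((m : Int) + 1) 1).foldl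
        (fun f i => PySem.Int.mod (f * i) (10 ^ 9 + 7)) 1
      = ((m.factorial : Nat) : Int) % (10 ^ 9 + 7) := by
  induction m with
  | zero =>
    rw [PySem.List.pyRange_one_eq_nil (by omega)]
    decide
  | succ j ih =>
    rcases Nat.eq_zero_or_pos j with hj | hj
    · subst hj
      rw [PySem.List.pyRange_one_eq_nil (by omega)]
      decide
    · have h : ((j + 1 : Nat) : Int) + 1 = ((j : Int) + 1) + 1 := by push_cast; ring
      rw [h, PySem.List.pyRange_one_succ_right (by omega), List.foldl_append, ih]
      simp only [List.foldl_cons, List.foldl_nil]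
      rw [PySem.Int.mod_eq_emod_of_pos (show (0:Int) < 10 ^ 9 + 7 by norm_num)]
      rw [mod_mul_mod]
      congr 1
      push_cast [Nat.factorial_succ]
      ring

-- ===== VERDICT (by name: the statement is the Claim_ definition above) =====
theorem solve_spec : Claim_equal_solve := by
  intro n _ hpre
  have hn : 0 ≤ n := hpre
  obtain ⟨m, rfl⟩ : ∃ m : Nat, n = (m : Int) := ⟨n.toNat, by omega⟩
  unfold Spec_solve solve solve_alt
  simp only [Int.toNat_natCast]
  rw [solveLoop_eq (((m : Int) + 1 - 1).toNat) _ 1 [] rfl, List.nil_append,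
    sum_dropLast m, factmod m]
  rw [PySem.Int.mod_eq_emod_of_pos (show (0:Int) < 10 ^ 9 + 7 by norm_num),
      PySem.Int.mod_eq_emod_of_pos (show (0:Int) < 10 ^ 9 + 7 by norm_num),
      PySem.Int.mod_eq_emod_of_pos (show (0:Int) < 10 ^ 9 + 7 by norm_num)]
  rw [Int.mul_emod ((m.factorial : Int)) ((m : Int) * ((m : Int) - 1))]
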